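-- pv_equiv track=rewrite | github.com/sshaayan/Checkers-AI | main.py | offenseEval
-- ===== SOURCE A (Python) =====
-- def offenseEval(whiteParam, blackParam, kingParam, colorParam):
--     numWhite = 0
--     numBlack = 0
--
--     # Gets the board configuration in a format that has all 35 bits
--     extendBitMask = 0b100000000000000000000000000000000000
--     bitStringW = bin(extendBitMask | whiteParam)[3:]
--     bitStringB = bin(extendBitMask | blackParam)[3:]
--
--     topWhite = bitStringW[:18]
--     bottomWhite = bitStringW[18:]
--     for bit in topWhite:
--         numWhite += (7 if bit == '1' else 0)
--     for bit in bottomWhite: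
--         numWhite += (5 if bit == '1' else 0)
--
--     topBlack = bitStringB[:18]
--     bottomBlack = bitStringB[18:]
--     for bit in topBlack:
--         numBlack += (5 if bit == '1' else 0)
--     for bit in bottomBlack:
--         numBlack += (7 if bit == '1' else 0)
--
--     if colorParam == "BLACK":
--         return numBlack - numWhite
--     else:
--         return numWhite - numBlack
-- ===== SOURCE B (Python) =====
-- def offenseEval(whiteParam, blackParam, kingParam, colorParam):
--     # Bit arithmetic instead of per-character string scanning: the high 18 of the
--     # 35 board positions weigh 7/5 for white and 5/7 for black.
--     w = whiteParam & 0x7FFFFFFFF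
--     b = blackParam & 0x7FFFFFFFF
--     numWhite = 7 * (w >> 17).bit_count() + 5 * (w & 0x1FFFF).bit_count()
--     numBlack = 5 * (b >> 17).bit_count() + 7 * (b & 0x1FFFF).bit_count()
--     if colorParam == "BLACK":
--         return numBlack - numWhite
--     else:
--         return numWhite - numBlack
-- ===== Notes on version B (the rewrite author's own statement) =====
-- stated objective: simpler
-- what changed: Replaces the bin()-string construction, slicing and four per-character loops with direct bit arithmetic: mask each board to 35 bits, split it with a shift into the high 18 and low 17 positions, and weight the popcounts 7/5 (white) and 5/7 (black).
-- outside the precondition, e.g. on offenseEval(-1, 0, 0, 'WHITE'): A returns 7, B returns 211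
import Mathlib
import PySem

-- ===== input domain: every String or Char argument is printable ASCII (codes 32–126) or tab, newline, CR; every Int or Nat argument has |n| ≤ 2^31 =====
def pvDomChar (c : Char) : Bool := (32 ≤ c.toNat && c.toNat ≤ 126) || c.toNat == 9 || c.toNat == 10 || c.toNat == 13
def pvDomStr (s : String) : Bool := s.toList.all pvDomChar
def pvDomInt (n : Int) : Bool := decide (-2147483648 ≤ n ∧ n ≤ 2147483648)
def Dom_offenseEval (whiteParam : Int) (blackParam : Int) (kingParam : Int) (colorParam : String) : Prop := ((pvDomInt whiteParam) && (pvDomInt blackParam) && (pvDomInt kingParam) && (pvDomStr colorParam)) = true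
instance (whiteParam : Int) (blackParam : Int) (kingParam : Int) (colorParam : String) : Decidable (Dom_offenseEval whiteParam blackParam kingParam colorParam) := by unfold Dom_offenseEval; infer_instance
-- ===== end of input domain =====

-- B replaces A's bin()-string slicing and per-character loops by masked popcounts
-- of the high-18/low-17 bit halves of each 35-bit board (objective: simpler).


-- ===== PORT A =====
-- bin(x) → PySem.Int.toBinChars0b (as List Char); [3:] / [:18] / [18:] with
-- nonnegative bounds are List.drop 3 / List.take 18 / List.drop 18 (exact there).
def offenseEval (whiteParam : Int) (blackParam : Int) (kingParam : Int) (colorParam : String) : Int :=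
  let numWhite : Int := 0
  let numBlack : Int := 0
  let extendBitMask : Int := 34359738368
  let bitStringW := (PySem.Int.toBinChars0b (PySem.Int.bor extendBitMask whiteParam)).drop 3
  let bitStringB := (PySem.Int.toBinChars0b (PySem.Int.bor extendBitMask blackParam)).drop 3
  let topWhite := bitStringW.take 18
  let bottomWhite := bitStringW.drop 18
  let numWhite := topWhite.foldl (fun acc bit => acc + (if bit == '1' then 7 else 0)) numWhite
  let numWhite := bottomWhite.foldl (fun acc bit => acc + (if bit == '1' then 5 else 0)) numWhite
  let topBlack := bitStringB.take 18
  let bottomBlack := bitStringB.drop 18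
  let numBlack := topBlack.foldl (fun acc bit => acc + (if bit == '1' then 5 else 0)) numBlack
  let numBlack := bottomBlack.foldl (fun acc bit => acc + (if bit == '1' then 7 else 0)) numBlack
  if colorParam == "BLACK" then numBlack - numWhite else numWhite - numBlack

-- ===== PORT B =====
def offenseEval_alt (whiteParam : Int) (blackParam : Int) (kingParam : Int) (colorParam : String) : Int :=
  let w := PySem.Int.band whiteParam 0x7FFFFFFFF
  let b := PySem.Int.band blackParam 0x7FFFFFFFF
  let numWhite : Int := 7 * PySem.Int.bitCount (w >>> (17:Nat)) + 5 * PySem.Int.bitCount (PySem.Int.band w 0x1FFFF)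
  let numBlack : Int := 5 * PySem.Int.bitCount (b >>> (17:Nat)) + 7 * PySem.Int.bitCount (PySem.Int.band b 0x1FFFF)
  if colorParam == "BLACK" then numBlack - numWhite else numWhite - numBlack

-- ===== PRECONDITION & SPEC =====
-- Pre_ excludes negative board parameters, on which A still returns a value: there
-- bin() yields a '-'-prefixed, unpadded string, so A's fixed [3:]/[:18] slicing
-- weighs bits by the accidental string length — an artefact of the representation,
-- not a board evaluation; B does the natural two's-complement masking there.
def Pre_offenseEval (whiteParam : Int) (blackParam : Int) (kingParam : Int) (colorParam : String) : Prop :=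
  0 ≤ whiteParam ∧ 0 ≤ blackParam
instance (whiteParam : Int) (blackParam : Int) (kingParam : Int) (colorParam : String) : Decidable (Pre_offenseEval whiteParam blackParam kingParam colorParam) := by unfold Pre_offenseEval; infer_instance

def pvWitness_offenseEval : Int × Int × Int × String := (20, 5, 0, "BLACK")

def Spec_offenseEval (whiteParam : Int) (blackParam : Int) (kingParam : Int) (colorParam : String) (out : Int) : Prop := out = offenseEval_alt whiteParam blackParam kingParam colorParam
instance (whiteParam : Int) (blackParam : Int) (kingParam : Int) (colorParam : String) (out : Int) : Decidable (Spec_offenseEval whiteParam blackParam kingParam colorParam out) := by unfold Spec_offenseEval; infer_instance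

-- ===== CLAIM (what is proved, stated in full; the proofs are below) =====
def Claim_equal_offenseEval : Prop := ∀ (whiteParam : Int) (blackParam : Int) (kingParam : Int) (colorParam : String), Dom_offenseEval whiteParam blackParam kingParam colorParam → Pre_offenseEval whiteParam blackParam kingParam colorParam → Spec_offenseEval whiteParam blackParam kingParam colorParam (offenseEval whiteParam blackParam kingParam colorParam)

-- ===== LEMMAS AND PROOFS =====

-- msb-first binary digits, as produced by Nat.toDigits 2 (no leading zeros; binSpec 0 = ['0'])
def binSpec (n : Nat) : List Char :=
  if n < 2 then [Nat.digitChar n] else binSpec (n / 2) ++ [Nat.digitChar (n % 2)]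
decreasing_by exact Nat.div_lt_self (by omega) (by omega)

-- msb-first binary digits of n, zero-padded/truncated to exactly k characters
def fb : Nat → Nat → List Char
  | 0, _ => []
  | k + 1, n => fb k (n / 2) ++ [Nat.digitChar (n % 2)]

theorem toDigitsCore_eq_binSpec (f : Nat) : ∀ n l, n < f →
    Nat.toDigitsCore 2 f n l = binSpec n ++ l := by
  induction f with
  | zero => intro n l h; omega
  | succ f ih =>
    intro n l h
    rw [Nat.toDigitsCore]
    by_cases h2 : n / 2 = 0
    · have hn : n < 2 := by omega
      have hm : n % 2 = n := Nat.mod_eq_of_lt hn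
      simp [h2, binSpec, hn, hm]
    · have hrec : binSpec n = binSpec (n / 2) ++ [Nat.digitChar (n % 2)] := by
        rw [binSpec, if_neg (by omega)]
      rw [if_neg h2, ih (n / 2) _ (by omega), hrec]
      simp

theorem toDigits_eq_binSpec (n : Nat) : Nat.toDigits 2 n = binSpec n :=
  by simpa using toDigitsCore_eq_binSpec (n + 1) n [] (by omega)

theorem binSpec_split (k : Nat) : ∀ a lo, 0 < a → lo < 2 ^ k →
    binSpec (a * 2 ^ k + lo) = binSpec a ++ fb k lo := by
  induction k with
  | zero =>
    intro a lo ha hlo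
    have h0 : lo = 0 := by omega
    subst h0
    show binSpec (a * 1 + 0) = binSpec a ++ []
    rw [Nat.mul_one, Nat.add_zero, List.append_nil]
  | succ k ih =>
    intro a lo ha hlo
    have h2 : (2:Nat) ≤ 2 ^ (k + 1) := by
      calc (2:Nat) = 2 ^ 1 := rfl
        _ ≤ 2 ^ (k + 1) := Nat.pow_le_pow_right (by omega) (by omega)
    have hmul : 2 ^ (k + 1) ≤ a * 2 ^ (k + 1) := Nat.le_mul_of_pos_left _ ha
    have hge : ¬ (a * 2 ^ (k + 1) + lo < 2) := by omega
    rw [binSpec, if_neg hge]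
    have hpow : (2:Nat) ^ (k + 1) = 2 ^ k * 2 := by ring
    have hdiv : (a * 2 ^ (k + 1) + lo) / 2 = a * 2 ^ k + lo / 2 := by
      rw [hpow, ← Nat.mul_assoc]
      generalize a * 2 ^ k = c
      omega
    have hmod : (a * 2 ^ (k + 1) + lo) % 2 = lo % 2 := by
      rw [hpow, ← Nat.mul_assoc]
      generalize a * 2 ^ k = c
      omega
    rw [hdiv, hmod, ih a (lo / 2) ha (by rw [hpow] at hlo; omega)]
    simp [fb]

theorem fb_length (k : Nat) : ∀ n, (fb k n).length = k := by
  induction k with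
  | zero => intro n; rfl
  | succ k ih => intro n; simp [fb, ih]

theorem fb_split (j k : Nat) : ∀ n, fb (j + k) n = fb j (n / 2 ^ k) ++ fb k (n % 2 ^ k) := by
  induction k with
  | zero =>
    intro n
    rw [Nat.pow_zero, Nat.div_one, Nat.mod_one]
    show fb j n = fb j n ++ ([] : List Char)
    rw [List.append_nil]
  | succ k ih =>
    intro n
    have hpow : (2:Nat) ^ (k + 1) = 2 * 2 ^ k := by ring
    show fb ((j + k) + 1) n = _
    rw [fb, ih (n / 2), fb]
    have h1 : n / 2 / 2 ^ k = n / 2 ^ (k + 1) := by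
      rw [Nat.div_div_eq_div_mul, hpow]
    have h2 : n / 2 % 2 ^ k = n % 2 ^ (k + 1) / 2 := by
      rw [hpow, Nat.mod_mul_right_div_self]
    have h3 : n % 2 = n % 2 ^ (k + 1) % 2 := by
      rw [Nat.mod_mod_of_dvd n (by rw [hpow]; exact Dvd.intro _ rfl)]
    rw [h1, h2, h3, List.append_assoc]

theorem fb_count_zero (k : Nat) : (fb k 0).count '1' = 0 := by
  induction k with
  | zero => rfl
  | succ k ih => simp [fb, Nat.digitChar, ih]

theorem fb_count (k : Nat) : ∀ n, n < 2 ^ k →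
    (fb k n).count '1' = PySem.Int.bitCount (n : Int) := by
  induction k with
  | zero =>
    intro n h
    have : n = 0 := by omega
    subst this
    simpa [fb] using PySem.Int.bitCount_natCast_zero.symm
  | succ k ih =>
    intro n h
    have hdiv : n / 2 < 2 ^ k := by
      have hpow : (2:Nat) ^ (k + 1) = 2 * 2 ^ k := by ring
      rw [hpow] at h; omega
    rw [fb, List.count_append]
    by_cases hz : n = 0
    · subst hz
      simpa [fb_count_zero, Nat.digitChar] using PySem.Int.bitCount_natCast_zero.symm
    · rw [PySem.Int.bitCount_natCast (by omega : 0 < n), ih (n / 2) hdiv]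
      have hmc : List.count '1' [Nat.digitChar (n % 2)] = n % 2 := by
        have h2 : n % 2 = 0 ∨ n % 2 = 1 := by omega
        rcases h2 with h2 | h2 <;> simp [h2, Nat.digitChar]
      rw [hmc]; omega

theorem foldl_weight (w : Int) (l : List Char) : ∀ a : Int,
    l.foldl (fun acc bit => acc + (if bit == '1' then w else 0)) a
      = a + w * (l.count '1' : Int) := by
  induction l with
  | nil => intro a; simp
  | cons c cs ih =>
    intro a
    rw [List.foldl_cons, ih, List.count_cons]
    by_cases hc : c = '1'
    · simp only [hc, beq_self_eq_true, if_pos]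
      push_cast; ring
    · have hb : (c == '1') = false := by simpa using hc
      simp only [hb, Bool.false_eq_true, if_false]
      push_cast; ring

-- the padded 35-bit string A slices, for a board 0 ≤ n < 2^35
set_option maxHeartbeats 1000000 in
theorem bitString_eq (n : Nat) (h : n < 2 ^ 35) :
    (PySem.Int.toBinChars0b (PySem.Int.bor 34359738368 (n : Int))).drop 3 = fb 35 n := by
  have hor : (2:Nat) ^ 35 ||| n = 2 ^ 35 + n := by
    have h1 := Nat.two_pow_add_eq_or_of_lt h 1
    simpa using h1.symm
  have hb : PySem.Int.bor 34359738368 (n : Int) = ((2 ^ 35 + n : Nat) : Int) := by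
    have he : (34359738368 : Int) = ((2 ^ 35 : Nat) : Int) := by norm_num
    rw [he, PySem.Int.bor_natCast, hor]
  rw [hb]
  unfold PySem.Int.toBinChars0b
  rw [if_neg (by exact not_lt.mpr (Int.natCast_nonneg _)), Int.toNat_natCast, toDigits_eq_binSpec]
  have h1m : (2:Nat) ^ 35 + n = 1 * 2 ^ 35 + n := by ring
  rw [h1m, binSpec_split 35 1 n (by omega) h]
  have h1 : binSpec 1 = ['1'] := by rw [binSpec]; simp [Nat.digitChar]
  rw [h1]
  simp

set_option maxHeartbeats 1000000 in
theorem maskId (n : Nat) (h : n < 2 ^ 35) : PySem.Int.band (n : Int) 0x7FFFFFFFF = (n : Int) := by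
  have he : (0x7FFFFFFFF : Int) = ((2 ^ 35 - 1 : Nat) : Int) := by norm_num
  rw [he, PySem.Int.band_natCast]
  congr 1
  rw [Nat.and_two_pow_sub_one_eq_mod]
  omega

set_option maxHeartbeats 1000000 in
theorem lowMask (n : Nat) : PySem.Int.band (n : Int) 0x1FFFF = ((n % 2 ^ 17 : Nat) : Int) := by
  have he : (0x1FFFF : Int) = ((2 ^ 17 - 1 : Nat) : Int) := by norm_num
  rw [he, PySem.Int.band_natCast]
  congr 1
  exact Nat.and_two_pow_sub_one_eq_mod n 17

theorem shift17 (n : Nat) : (n : Int) >>> (17 : Nat) = ((n / 2 ^ 17 : Nat) : Int) := by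
  have hr : (n : Int) >>> (17 : Nat) = ((n >>> 17 : Nat) : Int) := rfl
  rw [hr, Nat.shiftRight_eq_div_pow]

-- one side's accumulated weighted sum equals B's masked popcounts
set_option maxHeartbeats 1000000 in
theorem side_eq (wt wb : Int) (p : Int) (h0 : 0 ≤ p) (h1 : p < 2 ^ 35) :
    (((PySem.Int.toBinChars0b (PySem.Int.bor 34359738368 p)).drop 3).drop 18).foldl
        (fun acc bit => acc + (if bit == '1' then wb else 0))
      ((((PySem.Int.toBinChars0b (PySem.Int.bor 34359738368 p)).drop 3).take 18).foldl
        (fun acc bit => acc + (if bit == '1' then wt else 0)) 0)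
      = wt * PySem.Int.bitCount ((PySem.Int.band p 0x7FFFFFFFF) >>> (17:Nat))
        + wb * PySem.Int.bitCount (PySem.Int.band (PySem.Int.band p 0x7FFFFFFFF) 0x1FFFF) := by
  lift p to ℕ using h0 with n
  have hn : n < 2 ^ 35 := by exact_mod_cast h1
  rw [bitString_eq n hn]
  have hsplit : fb 35 n = fb 18 (n / 2 ^ 17) ++ fb 17 (n % 2 ^ 17) := fb_split 18 17 n
  have hlen : (fb 18 (n / 2 ^ 17)).length = 18 := fb_length 18 _
  have htake : (fb 35 n).take 18 = fb 18 (n / 2 ^ 17) := by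
    rw [hsplit, List.take_append_of_le_length (by omega), List.take_of_length_le (by omega)]
  have hdrop : (fb 35 n).drop 18 = fb 17 (n % 2 ^ 17) := by
    rw [hsplit, List.drop_append_of_le_length (by omega), List.drop_of_length_le (by omega),
      List.nil_append]
  rw [htake, hdrop, foldl_weight, foldl_weight]
  rw [maskId n hn, lowMask n, shift17 n]
  rw [fb_count 18 (n / 2 ^ 17) (by omega), fb_count 17 (n % 2 ^ 17) (by omega)]
  ring

-- ===== VERDICT (by name: the statement is the Claim_ definition above) =====
set_option maxHeartbeats 1000000 in
theorem offenseEval_spec : Claim_equal_offenseEval := by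
  intro wp bp kp color hdom hpre
  obtain ⟨hw, hb⟩ := hpre
  unfold Dom_offenseEval at hdom
  simp only [Bool.and_eq_true, pvDomInt, decide_eq_true_eq] at hdom
  have hdw : wp ≤ 2147483648 := hdom.1.1.1.2
  have hdb : bp ≤ 2147483648 := hdom.1.1.2.2
  unfold Spec_offenseEval offenseEval offenseEval_alt
  simp only []
  rw [side_eq 7 5 wp hw (by omega), side_eq 5 7 bp hb (by omega)]
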